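-- pv_equiv track=rewrite | github.com/matuspintek-boop/ib111 | 11/p6_template.py | resolve_template
-- ===== SOURCE A (Python) =====
-- def expansion(already_have: set[str], plus: str) -> set[str]:
--     output: set[str] = set()
--
--     for string in already_have:
--         output.add(string+plus)
--     return output
--
-- def resolve_template(template: str) -> set[str]:
--     output: set[str] = set()
--     if len(template.replace("[", "").replace("]", "")) == 0:
--         return set()
--     else:
--         output.add("")
--
--     work_list: list[str] = list(template)
--     variability: bool = False
--     index = 0
--     while index < len(work_list):
--         if work_list[index] == "[":
--             variability = True
--         elif work_list[index] == "]":
--             variability = False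
--         elif variability:
--             new_output: set[str] = set()
--             while work_list[index] != "]":
--                 new_output.update(expansion(output, work_list[index]))
--                 index += 1
--                 variability = False
--             output = new_output
--         else:
--             new_output_: set[str] = set()
--             new_output_.update(expansion(output, work_list[index]))
--             output = new_output_
--         index += 1
--
--     return output
-- ===== SOURCE B (Python) =====
-- def resolve_template(template: str) -> set[str]:
--     # Two-phase re-implementation: first parse the template into candidate
--     # groups, then expand them with one product-style fold over the groups.
--     if not template.replace("[", "").replace("]", ""):
--         return set()
--     n = len(template)
--     groups: list[str] = []
--     i = 0
--     while i < n:
--         c = template[i]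
--         if c == "[":
--             i += 1
--             while i < n and template[i] == "[":   # repeated '[' just re-opens the bracket
--                 i += 1
--             group = ""
--             while i < n and template[i] != "]":
--                 group += template[i]
--                 i += 1
--             if group:                              # an empty bracket contributes nothing
--                 groups.append(group)
--             i += 1
--         elif c == "]":                             # stray ']' outside a bracket: ignored
--             i += 1
--         else:
--             groups.append(c)
--             i += 1
--     results = {""}
--     for g in groups:
--         results = {s + ch for ch in g for s in results}
--     return results
-- ===== Notes on version B (the rewrite author's own statement) =====
-- stated objective: alternative
-- what changed: B replaces A's single-pass state machine (a variability flag with an inner set-expanding while loop per bracket) by a two-phase decomposition: first parse the template into a list of candidate groups, then expand them with one product-style fold over the groups.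
import Mathlib
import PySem

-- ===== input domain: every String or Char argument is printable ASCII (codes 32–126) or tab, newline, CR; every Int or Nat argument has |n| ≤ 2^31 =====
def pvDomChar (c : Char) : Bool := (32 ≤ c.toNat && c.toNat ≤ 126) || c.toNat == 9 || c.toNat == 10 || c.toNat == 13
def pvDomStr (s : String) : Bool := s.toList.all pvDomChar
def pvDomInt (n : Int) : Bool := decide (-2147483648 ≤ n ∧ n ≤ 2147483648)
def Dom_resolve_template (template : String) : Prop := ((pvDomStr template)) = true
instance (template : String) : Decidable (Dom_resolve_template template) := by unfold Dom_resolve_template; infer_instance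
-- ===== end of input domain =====

-- B re-implements A in two phases (parse candidate groups, then one product-style fold);
-- objective: alternative decomposition, same return value wherever A returns.
-- Loops are ported with a structural fuel parameter (≥ remaining iterations) as a totality guard.

-- ===== PORT A =====
def expansion (already_have : List String) (plus : String) : List String :=
  already_have.foldl (fun output s => PySem.Set.add output (s ++ plus)) PySem.Set.empty

def rtInner (cs : List Char) (output : List String) :
    Nat → List String → Nat → List String × Nat
  | 0, newOut, i => (newOut, i)
  | fuel + 1, newOut, i =>
    if h : i < cs.length then
      if cs[i] = ']' then (newOut, i)
      else rtInner cs output fuel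
        (PySem.Set.update newOut (expansion output (String.ofList [cs[i]]))) (i + 1)
    else (newOut, i)  -- Python raises IndexError here; such inputs are excluded by Pre_

def rtLoop (cs : List Char) : Nat → List String → Bool → Nat → List String
  | 0, output, _, _ => output
  | fuel + 1, output, variability, i =>
    if h : i < cs.length then
      if cs[i] = '[' then rtLoop cs fuel output true (i + 1)
      else if cs[i] = ']' then rtLoop cs fuel output false (i + 1)
      else if variability then
        rtLoop cs fuel (rtInner cs output fuel PySem.Set.empty i).1 false
          ((rtInner cs output fuel PySem.Set.empty i).2 + 1)
      else rtLoop cs fuel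
        (PySem.Set.update PySem.Set.empty (expansion output (String.ofList [cs[i]]))) false (i + 1)
    else output

def resolve_template (template : String) : List String :=
  if PySem.Str.len (PySem.Str.replace (PySem.Str.replace template "[" "") "]" "") = 0 then
    PySem.Set.empty
  else
    rtLoop template.toList (template.toList.length + 1) (PySem.Set.add PySem.Set.empty "") false 0

-- ===== PORT B =====
def rtSkip (cs : List Char) : Nat → Nat → Nat  -- while i < n and template[i] == "[": i += 1
  | 0, i => i
  | fuel + 1, i =>
    if h : i < cs.length then
      if cs[i] = '[' then rtSkip cs fuel (i + 1) else i
    else i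

def rtTake (cs : List Char) : Nat → Nat → List Char × Nat
  -- while i < n and template[i] != "]": group += template[i]; i += 1
  | 0, i => ([], i)
  | fuel + 1, i =>
    if h : i < cs.length then
      if cs[i] = ']' then ([], i)
      else ((cs[i] :: (rtTake cs fuel (i + 1)).1, (rtTake cs fuel (i + 1)).2))
    else ([], i)

def rtParse (cs : List Char) : Nat → Nat → List (List Char)
  | 0, _ => []
  | fuel + 1, i =>
    if h : i < cs.length then
      if cs[i] = '[' then
        if (rtTake cs fuel (rtSkip cs fuel (i + 1))).1 = [] then
          rtParse cs fuel ((rtTake cs fuel (rtSkip cs fuel (i + 1))).2 + 1)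
        else
          (rtTake cs fuel (rtSkip cs fuel (i + 1))).1 ::
            rtParse cs fuel ((rtTake cs fuel (rtSkip cs fuel (i + 1))).2 + 1)
      else if cs[i] = ']' then rtParse cs fuel (i + 1)
      else [cs[i]] :: rtParse cs fuel (i + 1)
    else []

def rtStep (results : List String) (g : List Char) : List String :=
  PySem.Set.ofList (g.flatMap (fun ch => results.map (fun s => s ++ String.ofList [ch])))

def resolve_template_alt (template : String) : List String :=
  if PySem.Str.len (PySem.Str.replace (PySem.Str.replace template "[" "") "]" "") = 0 then
    PySem.Set.empty
  else
    (rtParse template.toList (template.toList.length + 1) 0).foldl rtStep (PySem.Set.ofList [""])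

-- ===== PRECONDITION & SPEC =====
-- Pre_ excludes exactly the inputs on which Python A raises IndexError: a template that
-- still contains a non-bracket character and has an unclosed opening bracket followed by
-- some character other than an opening bracket but by no later closing bracket.
def Pre_resolve_template (template : String) : Prop :=
  (template.toList.all (fun c => c == '[' || c == ']') ||
   (List.range template.toList.length).all (fun j =>
     template.toList.getD j ' ' != '[' ||
     (List.range template.toList.length).any
       (fun k => decide (j < k) && template.toList.getD k ' ' == ']') ||
     (List.range template.toList.length).all
       (fun k => !(decide (j < k)) || template.toList.getD k ' ' == '['))) = true
instance (template : String) : Decidable (Pre_resolve_template template) := by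
  unfold Pre_resolve_template; infer_instance

def pvWitness_resolve_template : String := "a[bc]d"

def Spec_resolve_template (template : String) (out : List String) : Prop :=
  out = resolve_template_alt template
instance (template : String) (out : List String) : Decidable (Spec_resolve_template template out) := by
  unfold Spec_resolve_template; infer_instance

-- ===== CLAIM (what is proved, stated in full; the proofs are below) =====
def Claim_equal_resolve_template : Prop :=
  ∀ (template : String), Dom_resolve_template template → Pre_resolve_template template →
    Spec_resolve_template template (resolve_template template)

-- ===== LEMMAS AND PROOFS =====

theorem expansion_eq_map (P : List String) (hP : P.Nodup) (c : String) :
    expansion P c = P.map (fun s => s ++ c) := by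
  unfold expansion
  rw [← PySem.Set.update_map_eq_foldl_add, PySem.Set.update_empty,
      PySem.Set.ofList_eq_self_of_nodup]
  exact hP.map (fun a b h => (String.append_left_inj c).mp h)

theorem foldl_update_flatMap (f : Char → List String) (g : List Char) (X : List String) :
    g.foldl (fun acc c => PySem.Set.update acc (f c)) X = PySem.Set.update X (g.flatMap f) := by
  induction g generalizing X with
  | nil => simp [PySem.Set.update]
  | cons c g ih => simp [ih, PySem.Set.update_append]

theorem rtStep_eq (P : List String) (g : List Char) :
    rtStep P g = PySem.Set.update PySem.Set.empty
      (g.flatMap (fun c => P.map (fun s => s ++ String.ofList [c]))) := by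
  unfold rtStep
  rw [PySem.Set.update_empty]

theorem rtSkip_le (cs : List Char) : ∀ f i, i ≤ rtSkip cs f i := by
  intro f
  induction f with
  | zero => intro i; simp [rtSkip]
  | succ f ih =>
    intro i
    rw [rtSkip]
    split
    · split
      · exact Nat.le_trans (Nat.le_succ i) (ih (i + 1))
      · exact Nat.le_refl i
    · exact Nat.le_refl i

theorem rtTake_le (cs : List Char) : ∀ f i, i ≤ (rtTake cs f i).2 := by
  intro f
  induction f with
  | zero => intro i; simp [rtTake]
  | succ f ih =>
    intro i
    rw [rtTake]
    split
    · split
      · exact Nat.le_refl i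
      · exact Nat.le_trans (Nat.le_succ i) (ih (i + 1))
    · exact Nat.le_refl i

theorem rtSkip_nil (cs : List Char) (f i : Nat) (h : cs.length ≤ i) : rtSkip cs f i = i := by
  cases f <;> simp [rtSkip, Nat.not_lt.2 h]

theorem rtSkip_id (cs : List Char) (f i : Nat) (h : i < cs.length) (hc : cs[i] ≠ '[') :
    rtSkip cs f i = i := by
  cases f <;> simp [rtSkip, h, hc]

theorem rtSkip_step (cs : List Char) (f i : Nat) (h : i < cs.length) (hc : cs[i] = '[') :
    rtSkip cs (f + 1) i = rtSkip cs f (i + 1) := by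
  simp [rtSkip, h, hc]

theorem rtSkip_irrel (cs : List Char) :
    ∀ f f' i, cs.length - i ≤ f → cs.length - i ≤ f' → rtSkip cs f i = rtSkip cs f' i := by
  intro f
  induction f with
  | zero =>
    intro f' i hf hf'
    rw [rtSkip_nil cs 0 i (by omega), rtSkip_nil cs f' i (by omega)]
  | succ f ih =>
    intro f' i hf hf'
    by_cases hi : i < cs.length
    · by_cases hc : cs[i] = '['
      · obtain ⟨g', rfl⟩ : ∃ g', f' = g' + 1 := ⟨f' - 1, by omega⟩
        rw [rtSkip_step cs f i hi hc, rtSkip_step cs g' i hi hc]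
        exact ih g' (i + 1) (by omega) (by omega)
      · rw [rtSkip_id cs (f + 1) i hi hc, rtSkip_id cs f' i hi hc]
    · rw [rtSkip_nil cs (f + 1) i (by omega), rtSkip_nil cs f' i (by omega)]

theorem rtTake_nil (cs : List Char) (f i : Nat) (h : cs.length ≤ i) : rtTake cs f i = ([], i) := by
  cases f <;> simp [rtTake, Nat.not_lt.2 h]

theorem rtTake_stop (cs : List Char) (f i : Nat) (h : i < cs.length) (hc : cs[i] = ']') :
    rtTake cs f i = ([], i) := by
  cases f <;> simp [rtTake, h, hc]

theorem rtTake_step (cs : List Char) (f i : Nat) (h : i < cs.length) (hc : cs[i] ≠ ']') :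
    rtTake cs (f + 1) i = (cs[i] :: (rtTake cs f (i + 1)).1, (rtTake cs f (i + 1)).2) := by
  simp [rtTake, h, hc]

theorem rtTake_irrel (cs : List Char) :
    ∀ f f' i, cs.length - i ≤ f → cs.length - i ≤ f' → rtTake cs f i = rtTake cs f' i := by
  intro f
  induction f with
  | zero =>
    intro f' i hf hf'
    rw [rtTake_nil cs 0 i (by omega), rtTake_nil cs f' i (by omega)]
  | succ f ih =>
    intro f' i hf hf'
    by_cases hi : i < cs.length
    · by_cases hc : cs[i] = ']'
      · rw [rtTake_stop cs (f + 1) i hi hc, rtTake_stop cs f' i hi hc]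
      · obtain ⟨g', rfl⟩ : ∃ g', f' = g' + 1 := ⟨f' - 1, by omega⟩
        rw [rtTake_step cs f i hi hc, rtTake_step cs g' i hi hc,
            ih g' (i + 1) (by omega) (by omega)]
    · rw [rtTake_nil cs (f + 1) i (by omega), rtTake_nil cs f' i (by omega)]

theorem rtParse_nil (cs : List Char) (f i : Nat) (h : cs.length ≤ i) : rtParse cs f i = [] := by
  cases f <;> simp [rtParse, Nat.not_lt.2 h]

def rtParseBr (cs : List Char) (fuel i : Nat) : List (List Char) :=
  if (rtTake cs fuel (rtSkip cs fuel i)).1 = [] then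
    rtParse cs fuel ((rtTake cs fuel (rtSkip cs fuel i)).2 + 1)
  else
    (rtTake cs fuel (rtSkip cs fuel i)).1 ::
      rtParse cs fuel ((rtTake cs fuel (rtSkip cs fuel i)).2 + 1)

theorem rtParse_bracket (cs : List Char) (f i : Nat) (h : i < cs.length) (hc : cs[i] = '[') :
    rtParse cs (f + 1) i = rtParseBr cs f (i + 1) := by
  rw [rtParse]
  unfold rtParseBr
  simp [h, hc]

theorem rtParse_irrel (cs : List Char) :
    ∀ d f f' i, cs.length - i ≤ d → cs.length - i ≤ f → cs.length - i ≤ f' →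
      rtParse cs f i = rtParse cs f' i := by
  intro d
  induction d with
  | zero =>
    intro f f' i hd hf hf'
    rw [rtParse_nil cs f i (by omega), rtParse_nil cs f' i (by omega)]
  | succ d ih =>
    intro f f' i hd hf hf'
    by_cases hi : i < cs.length
    · obtain ⟨g, rfl⟩ : ∃ g, f = g + 1 := ⟨f - 1, by omega⟩
      obtain ⟨g', rfl⟩ : ∃ g', f' = g' + 1 := ⟨f' - 1, by omega⟩
      by_cases hbr : cs[i] = '['
      · rw [rtParse_bracket cs g i hi hbr, rtParse_bracket cs g' i hi hbr]
        unfold rtParseBr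
        rw [rtSkip_irrel cs g g' (i + 1) (by omega) (by omega)]
        have hm : i + 1 ≤ rtSkip cs g' (i + 1) := rtSkip_le cs g' (i + 1)
        rw [rtTake_irrel cs g g' (rtSkip cs g' (i + 1)) (by omega) (by omega)]
        have hp : rtSkip cs g' (i + 1) ≤ (rtTake cs g' (rtSkip cs g' (i + 1))).2 :=
          rtTake_le cs g' (rtSkip cs g' (i + 1))
        rw [ih g g' ((rtTake cs g' (rtSkip cs g' (i + 1))).2 + 1) (by omega) (by omega) (by omega)]
      · by_cases hcl : cs[i] = ']'
        · have e1 : rtParse cs (g + 1) i = rtParse cs g (i + 1) := by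
            rw [rtParse, dif_pos hi, if_neg hbr, if_pos hcl]
          have e2 : rtParse cs (g' + 1) i = rtParse cs g' (i + 1) := by
            rw [rtParse, dif_pos hi, if_neg hbr, if_pos hcl]
          rw [e1, e2]
          exact ih g g' (i + 1) (by omega) (by omega) (by omega)
        · have e1 : rtParse cs (g + 1) i = [cs[i]] :: rtParse cs g (i + 1) := by
            rw [rtParse, dif_pos hi, if_neg hbr, if_neg hcl]
          have e2 : rtParse cs (g' + 1) i = [cs[i]] :: rtParse cs g' (i + 1) := by
            rw [rtParse, dif_pos hi, if_neg hbr, if_neg hcl]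
          rw [e1, e2, ih g g' (i + 1) (by omega) (by omega) (by omega)]
    · rw [rtParse_nil cs (f := _) i (by omega), rtParse_nil cs (f := _) i (by omega)]

theorem rtParseBr_congr (cs : List Char) (f f' i : Nat)
    (hf : cs.length - i ≤ f) (hf' : cs.length - i ≤ f') :
    rtParseBr cs f i = rtParseBr cs f' i := by
  unfold rtParseBr
  rw [rtSkip_irrel cs f f' i hf hf']
  have hm : i ≤ rtSkip cs f' i := rtSkip_le cs f' i
  rw [rtTake_irrel cs f f' (rtSkip cs f' i) (by omega) (by omega)]
  have hp : rtSkip cs f' i ≤ (rtTake cs f' (rtSkip cs f' i)).2 := rtTake_le cs f' (rtSkip cs f' i)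
  rw [rtParse_irrel cs cs.length f f' ((rtTake cs f' (rtSkip cs f' i)).2 + 1)
      (by omega) (by omega) (by omega)]

theorem rtParseBr_nil (cs : List Char) (f i : Nat) (h : cs.length ≤ i) : rtParseBr cs f i = [] := by
  unfold rtParseBr
  rw [rtSkip_nil cs f i h, rtTake_nil cs f i h]
  simp [rtParse_nil cs f (i + 1) (by omega)]

theorem rtParseBr_bracket (cs : List Char) (g i : Nat) (h : i < cs.length) (hc : cs[i] = '[')
    (hg : cs.length - i ≤ g + 1) :
    rtParseBr cs (g + 1) i = rtParseBr cs g (i + 1) := by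
  unfold rtParseBr
  rw [rtSkip_step cs g i h hc]
  have hm : i + 1 ≤ rtSkip cs g (i + 1) := rtSkip_le cs g (i + 1)
  rw [rtTake_irrel cs (g + 1) g (rtSkip cs g (i + 1)) (by omega) (by omega)]
  have hp : rtSkip cs g (i + 1) ≤ (rtTake cs g (rtSkip cs g (i + 1))).2 :=
    rtTake_le cs g (rtSkip cs g (i + 1))
  rw [rtParse_irrel cs cs.length (g + 1) g ((rtTake cs g (rtSkip cs g (i + 1))).2 + 1)
      (by omega) (by omega) (by omega)]

theorem rtInner_eq_take (cs : List Char) (P : List String) (hP : P.Nodup) :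
    ∀ f i newOut, rtInner cs P f newOut i =
      ((rtTake cs f i).1.foldl
        (fun acc c => PySem.Set.update acc (P.map (fun s => s ++ String.ofList [c]))) newOut,
       (rtTake cs f i).2) := by
  intro f
  induction f with
  | zero => intro i newOut; simp [rtInner, rtTake]
  | succ f ih =>
    intro i newOut
    by_cases hi : i < cs.length
    · by_cases hc : cs[i] = ']'
      · rw [rtTake_stop cs (f + 1) i hi hc, rtInner]
        simp [hi, hc]
      · rw [rtTake_step cs f i hi hc, rtInner]
        simp only [hi, dif_pos, hc, if_false, List.foldl_cons]
        rw [expansion_eq_map P hP]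
        exact ih (i + 1) _
    · rw [rtTake_nil cs (f + 1) i (by omega), rtInner]
      simp [hi]

theorem main_loop (cs : List Char) :
    ∀ d g i P (variability : Bool), cs.length - i ≤ d → cs.length - i ≤ g → P.Nodup →
      rtLoop cs (g + 1) P variability i =
        ((if variability then rtParseBr cs g i else rtParse cs (g + 1) i).foldl rtStep P) := by
  intro d
  induction d with
  | zero =>
    intro g i P var hd hg hP
    have hi : ¬ i < cs.length := by omega
    rw [rtLoop]
    rw [rtParse_nil cs (g + 1) i (by omega), rtParseBr_nil cs g i (by omega)]
    cases var
    · simp [hi]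
    · simp [hi]
  | succ d ih =>
    intro g i P var hd hg hP
    by_cases hi : i < cs.length
    · obtain ⟨g', rfl⟩ : ∃ g', g = g' + 1 := ⟨g - 1, by omega⟩
      rw [rtLoop]
      by_cases hbr : cs[i] = '['
      · -- opening bracket: variability := True
        rw [dif_pos hi, if_pos hbr]
        rw [ih g' (i + 1) P true (by omega) (by omega) hP]
        simp only [if_true]
        cases var
        · simp only [Bool.false_eq_true, if_false]
          rw [rtParse_bracket cs (g' + 1) i hi hbr,
              rtParseBr_congr cs (g' + 1) g' (i + 1) (by omega) (by omega)]
        · simp only [if_true]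
          rw [rtParseBr_bracket cs g' i hi hbr (by omega)]
      · by_cases hcl : cs[i] = ']'
        · -- closing bracket: variability := False
          rw [dif_pos hi, if_neg hbr, if_pos hcl]
          rw [ih g' (i + 1) P false (by omega) (by omega) hP]
          simp only [Bool.false_eq_true, if_false]
          cases var
          · simp only [Bool.false_eq_true, if_false]
            have hparse : rtParse cs (g' + 1 + 1) i = rtParse cs (g' + 1) (i + 1) := by
              rw [rtParse]; simp [hi, hcl]
            rw [hparse]
          · simp only [if_true]
            have hout : rtParseBr cs (g' + 1) i = rtParse cs (g' + 1) (i + 1) := by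
              unfold rtParseBr
              rw [rtSkip_id cs (g' + 1) i hi hbr, rtTake_stop cs (g' + 1) i hi hcl]
              simp
            rw [hout]
        · -- ordinary character
          have hne : (rtTake cs (g' + 1) i).1 ≠ [] := by
            rw [rtTake_step cs g' i hi hcl]; simp
          cases var
          · -- variability = False: single-character step
            rw [dif_pos hi, if_neg hbr, if_neg hcl]
            simp only [Bool.false_eq_true, if_false]
            have hnew : PySem.Set.update PySem.Set.empty (expansion P (String.ofList [cs[i]]))
                = PySem.Set.ofList (P.map (fun s => s ++ String.ofList [cs[i]])) := by
              rw [expansion_eq_map P hP, PySem.Set.update_empty]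
            rw [hnew, ih g' (i + 1) _ false (by omega) (by omega) (PySem.Set.nodup_ofList _)]
            simp only [Bool.false_eq_true, if_false]
            have hparse : rtParse cs (g' + 1 + 1) i = [cs[i]] :: rtParse cs (g' + 1) (i + 1) := by
              rw [rtParse]; simp [hi, hbr, hcl]
            rw [hparse, List.foldl_cons]
            congr 1
            rw [rtStep_eq]
            simp only [List.flatMap_cons, List.flatMap_nil, List.append_nil]
            exact (PySem.Set.update_empty _).symm
          · -- variability = True: the inner while loop collects one group
            rw [dif_pos hi, if_neg hbr, if_neg hcl]
            rw [rtInner_eq_take cs P hP (g' + 1) i PySem.Set.empty]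
            rw [foldl_update_flatMap (fun c => P.map (fun s => s ++ String.ofList [c]))
                (rtTake cs (g' + 1) i).1 PySem.Set.empty, ← rtStep_eq]
            have hj : i ≤ (rtTake cs (g' + 1) i).2 := rtTake_le cs (g' + 1) i
            rw [ih g' ((rtTake cs (g' + 1) i).2 + 1) (rtStep P (rtTake cs (g' + 1) i).1) false
                (by omega) (by omega)
                (by rw [rtStep_eq, PySem.Set.update_empty]; exact PySem.Set.nodup_ofList _)]
            simp only [Bool.false_eq_true, if_false, if_true]
            have hout : rtParseBr cs (g' + 1) i
                = (rtTake cs (g' + 1) i).1 :: rtParse cs (g' + 1) ((rtTake cs (g' + 1) i).2 + 1) := by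
              unfold rtParseBr
              rw [rtSkip_id cs (g' + 1) i hi hbr, if_neg hne]
            rw [hout, List.foldl_cons]
    · rw [rtLoop]
      rw [rtParse_nil cs (g + 1) i (by omega), rtParseBr_nil cs g i (by omega)]
      cases var
      · simp [hi]
      · simp [hi]

theorem resolve_template_spec : Claim_equal_resolve_template := by
  intro t _ _
  unfold Spec_resolve_template resolve_template resolve_template_alt
  simp only [pysem]
  split_ifs with h
  · rfl
  · have hmain := main_loop t.toList t.toList.length t.toList.length 0
      (PySem.Set.add [] "") false (by omega) (by omega) (by simp [PySem.Set.add])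
    simp only [Bool.false_eq_true, if_false] at hmain
    exact hmain.trans (by rfl)
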